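-- pv_equiv track=rewrite | github.com/vincenzorm117/CCI_6edition | CCI_6edition/chapter16/24_pairs_with_sum/python/solution.py | verifyAnswer
-- ===== SOURCE A (Python) =====
-- def verifyAnswer(array, pairs):
--     freq = {}
--     for num in array:
--         if num in freq:
--             freq[num] += 1
--         else:
--             freq[num] = 1
--
--     for num, complement in pairs:
--         if num in freq and complement in freq:
--             freq[num] -= 1
--             freq[complement] -= 1
--             if freq[num] < 0 or freq[complement] < 0:
--                 return False
--         else:
--             return False
--     return True
-- ===== SOURCE B (Python) =====
-- def verifyAnswer(array, pairs):
--     supply = {}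
--     for num in array:
--         supply[num] = supply.get(num, 0) + 1
--     demand = {}
--     for num, complement in pairs:
--         demand[num] = demand.get(num, 0) + 1
--         demand[complement] = demand.get(complement, 0) + 1
--     return all(supply.get(v, 0) >= need for v, need in demand.items())
-- ===== Notes on version B (the rewrite author's own statement) =====
-- stated objective: alternative
-- what changed: Replaces the stateful decrement-and-underflow short-circuit loop by an aggregate supply/demand comparison: one counting pass over the array, one counting pass over the pairs (both pair positions), then a single check that demand never exceeds supply.
import Mathlib
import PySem

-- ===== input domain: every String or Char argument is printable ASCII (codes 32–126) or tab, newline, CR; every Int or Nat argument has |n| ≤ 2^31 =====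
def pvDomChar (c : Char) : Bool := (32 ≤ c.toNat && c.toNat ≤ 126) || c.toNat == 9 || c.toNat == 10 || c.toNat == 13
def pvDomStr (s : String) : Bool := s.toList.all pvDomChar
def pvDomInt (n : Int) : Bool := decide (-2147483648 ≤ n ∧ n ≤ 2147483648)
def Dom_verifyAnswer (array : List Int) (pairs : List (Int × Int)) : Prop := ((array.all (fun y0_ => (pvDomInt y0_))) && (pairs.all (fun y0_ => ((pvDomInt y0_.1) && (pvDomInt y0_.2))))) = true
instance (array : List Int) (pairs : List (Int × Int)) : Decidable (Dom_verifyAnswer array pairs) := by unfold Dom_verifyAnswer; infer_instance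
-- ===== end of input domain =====

-- B replaces A's stateful decrement-and-underflow short-circuit loop by an aggregate
-- supply/demand count comparison (objective: alternative decomposition, same cost).

-- ===== PORT A =====
-- the second loop of A: consume each pair from freq, failing on a missing key or underflow
def pvCheckPairs (d : PySem.Dict Int Int) : List (Int × Int) → Bool
  | [] => true
  | (num, complement) :: rest =>
    if d.contains num && d.contains complement then
      let d1 := d.modify num 0 (· - 1)
      let d2 := d1.modify complement 0 (· - 1)
      if d2.getD num 0 < 0 || d2.getD complement 0 < 0 then false
      else pvCheckPairs d2 rest
    else false

def verifyAnswer (array : List Int) (pairs : List (Int × Int)) : Bool :=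
  let freq := array.foldl
    (fun d num => if d.contains num then d.modify num 0 (· + 1) else d.insert num 1)
    PySem.Dict.empty
  pvCheckPairs freq pairs

-- ===== PORT B =====
def verifyAnswer_alt (array : List Int) (pairs : List (Int × Int)) : Bool :=
  let supply := array.foldl (fun d x => d.insert x (d.getD x 0 + 1))
    (PySem.Dict.empty : PySem.Dict Int Int)
  let demand := pairs.foldl
    (fun d p =>
      let d1 := d.insert p.1 (d.getD p.1 0 + 1)
      d1.insert p.2 (d1.getD p.2 0 + 1))
    (PySem.Dict.empty : PySem.Dict Int Int)
  demand.items.all (fun vc => decide (supply.getD vc.1 0 ≥ vc.2))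

-- ===== PRECONDITION & SPEC =====
def Spec_verifyAnswer (array : List Int) (pairs : List (Int × Int)) (out : Bool) : Prop := out = verifyAnswer_alt array pairs
instance (array : List Int) (pairs : List (Int × Int)) (out : Bool) : Decidable (Spec_verifyAnswer array pairs out) := by unfold Spec_verifyAnswer; infer_instance

-- ===== CLAIM (what is proved, stated in full; the proofs are below) =====
def Claim_equal_verifyAnswer : Prop := ∀ (array : List Int) (pairs : List (Int × Int)), Dom_verifyAnswer array pairs → Spec_verifyAnswer array pairs (verifyAnswer array pairs)

-- ===== LEMMAS AND PROOFS =====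

-- both pair positions, flattened: the multiset of values the pairs demand
def pvFlat (ps : List (Int × Int)) : List Int := ps.flatMap (fun p => [p.1, p.2])

lemma pvFlat_cons (a b : Int) (rest : List (Int × Int)) :
    pvFlat ((a, b) :: rest) = a :: b :: pvFlat rest := rfl

-- A's first loop builds exactly Counter(array)
lemma pvFreq_eq_counter (array : List Int) :
    array.foldl
      (fun d num => if d.contains num then d.modify num 0 (· + 1) else d.insert num 1)
      PySem.Dict.empty = PySem.Dict.counter array := by
  rw [PySem.Dict.counter_eq_foldl]
  congr 1
  funext d num
  by_cases h : d.contains num = true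
  · simp [h]
  · simp only [Bool.not_eq_true] at h
    simp [h, PySem.Dict.modify, PySem.Dict.getD_of_not_contains d 0 h]

-- characterisation of A's pair loop on an arbitrary dict state
lemma pvCheckPairs_spec (ps : List (Int × Int)) (d : PySem.Dict Int Int) :
    pvCheckPairs d ps =
      decide (∀ v ∈ pvFlat ps, d.contains v = true ∧ ((pvFlat ps).count v : Int) ≤ d.getD v 0) := by
  induction ps generalizing d with
  | nil => simp [pvCheckPairs, pvFlat]
  | cons p rest ih =>
    obtain ⟨a, b⟩ := p
    rw [pvFlat_cons]
    show (if d.contains a && d.contains b then _ else false) = _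
    by_cases hab : (d.contains a && d.contains b) = true
    · obtain ⟨ha, hb⟩ := Bool.and_eq_true_iff.mp hab
      rw [if_pos hab]
      set d1 := d.modify a 0 (· - 1) with hd1
      set d2 := d1.modify b 0 (· - 1) with hd2
      have hgd : ∀ v, d2.getD v 0 =
          d.getD v 0 - ((if v = a then 1 else 0) + (if v = b then 1 else 0)) := by
        intro v
        rw [hd2, PySem.Dict.getD_modify, hd1, PySem.Dict.getD_modify, PySem.Dict.getD_modify]
        split_ifs <;> subst_vars <;> omega
      have hcn : ∀ v, d2.contains v = ((v == b) || ((v == a) || d.contains v)) := by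
        intro v
        rw [hd2, PySem.Dict.contains_modify, hd1, PySem.Dict.contains_modify]
      have hcnt : ∀ v, ((a :: b :: pvFlat rest).count v : Int) =
          ((pvFlat rest).count v : Int) + ((if v = a then 1 else 0) + (if v = b then 1 else 0)) := by
        intro v
        simp only [List.count_cons, beq_iff_eq]
        split_ifs <;> push_cast <;> omega
      have hnn : ∀ w : Int, (0:Int) ≤ ((pvFlat rest).count w : Int) := fun w => Int.natCast_nonneg _
      by_cases hu : (d2.getD a 0 < 0 || d2.getD b 0 < 0) = true
      · rw [if_pos hu, eq_comm, decide_eq_false_iff_not]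
        intro h
        have hca := (h a (by simp)).2
        have hcb := (h b (by simp)).2
        rw [hcnt a] at hca
        rw [hcnt b] at hcb
        have hnna := hnn a
        have hnnb := hnn b
        have h' : d.getD a 0 < ((if a = a then 1 else 0) + if a = b then 1 else 0) ∨
            d.getD b 0 < ((if b = a then 1 else 0) + if b = b then 1 else 0) := by
          rcases Bool.or_eq_true_iff.mp hu with h' | h' <;>
            rw [decide_eq_true_iff, hgd] at h' <;> [left; right] <;> omega
        by_cases hab2 : a = b
        · subst hab2
          simp at h' hca hcb
          omega
        · simp [hab2, Ne.symm hab2] at h' hca hcb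
          omega
      · rw [if_neg hu, ih d2]
        apply decide_eq_decide.mpr
        simp only [Bool.or_eq_true, decide_eq_true_iff, not_or, not_lt] at hu
        obtain ⟨hua, hub⟩ := hu
        constructor
        · intro h v hv
          rw [List.mem_cons, List.mem_cons] at hv
          rcases hv with rfl | rfl | hv
          · refine ⟨ha, ?_⟩
            rw [hcnt v]
            by_cases hmem : v ∈ pvFlat rest
            · have hle := (h v hmem).2
              rw [hgd v] at hle
              omega
            · rw [List.count_eq_zero_of_not_mem hmem]
              rw [hgd v] at hua
              omega
          · refine ⟨hb, ?_⟩
            rw [hcnt v]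
            by_cases hmem : v ∈ pvFlat rest
            · have hle := (h v hmem).2
              rw [hgd v] at hle
              omega
            · rw [List.count_eq_zero_of_not_mem hmem]
              rw [hgd v] at hub
              omega
          · obtain ⟨hc, hle⟩ := h v hv
            rw [hcn v] at hc
            refine ⟨?_, ?_⟩
            · simp only [Bool.or_eq_true, beq_iff_eq] at hc
              rcases hc with rfl | rfl | hc
              · exact hb
              · exact ha
              · exact hc
            · rw [hgd v] at hle
              rw [hcnt v]
              omega
        · intro h v hv
          obtain ⟨hc, hle⟩ := h v (by simp [hv])
          refine ⟨?_, ?_⟩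
          · rw [hcn v]
            simp [hc]
          · rw [hgd v]
            rw [hcnt v] at hle
            omega
    · rw [if_neg hab, eq_comm, decide_eq_false_iff_not]
      simp only [Bool.and_eq_true, not_and] at hab
      intro h
      exact hab (h a (by simp)).1 (h b (by simp)).1

-- A's result as an aggregate condition
lemma pvA_char (array : List Int) (pairs : List (Int × Int)) :
    verifyAnswer array pairs =
      decide (∀ v ∈ pvFlat pairs, v ∈ array ∧ ((pvFlat pairs).count v : Int) ≤ (array.count v : Int)) := by
  show pvCheckPairs _ pairs = _
  rw [pvFreq_eq_counter, pvCheckPairs_spec]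
  apply decide_eq_decide.mpr
  constructor <;> intro h v hv <;> obtain ⟨h1, h2⟩ := h v hv
  · rw [PySem.Dict.contains_counter] at h1
    rw [PySem.Dict.getD_counter] at h2
    exact ⟨by simpa using h1, h2⟩
  · refine ⟨by rw [PySem.Dict.contains_counter]; simpa using h1, ?_⟩
    rw [PySem.Dict.getD_counter]
    exact h2

-- B's demand loop is the single-value counting loop over the flattened pairs
lemma pvDemand_eq_counter (pairs : List (Int × Int)) :
    pairs.foldl
      (fun d p =>
        (d.insert p.1 (d.getD p.1 0 + 1)).insert p.2
          ((d.insert p.1 (d.getD p.1 0 + 1)).getD p.2 0 + 1))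
      PySem.Dict.empty = PySem.Dict.counter (pvFlat pairs) := by
  rw [← PySem.Dict.foldl_insert_getD_add_one_eq_counter]
  generalize PySem.Dict.empty = d
  induction pairs generalizing d with
  | nil => rfl
  | cons p rest ih =>
    obtain ⟨a, b⟩ := p
    rw [pvFlat_cons]
    simp only [List.foldl_cons]
    exact ih _

-- B's result as the same aggregate condition
lemma pvB_char (array : List Int) (pairs : List (Int × Int)) :
    verifyAnswer_alt array pairs =
      decide (∀ v ∈ pvFlat pairs, ((pvFlat pairs).count v : Int) ≤ (array.count v : Int)) := by
  simp only [verifyAnswer_alt]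
  rw [pvDemand_eq_counter, PySem.Dict.foldl_insert_getD_add_one_eq_counter,
    PySem.Dict.items_counter, List.all_map, List.all_eq]
  apply decide_eq_decide.mpr
  constructor
  · intro h v hv
    have := h v ((PySem.Set.mem_ofList _ _).mpr hv)
    simpa [PySem.Dict.getD_counter] using this
  · intro h v hv
    have := h v ((PySem.Set.mem_ofList _ _).mp hv)
    simpa [PySem.Dict.getD_counter] using this

-- ===== VERDICT (by name: the statement is the Claim_ definition above) =====
theorem verifyAnswer_spec : Claim_equal_verifyAnswer := by
  intro array pairs _
  show verifyAnswer array pairs = verifyAnswer_alt array pairs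
  rw [pvA_char, pvB_char]
  apply decide_eq_decide.mpr
  constructor
  · intro h v hv
    exact (h v hv).2
  · intro h v hv
    refine ⟨?_, h v hv⟩
    have h1 : 0 < (pvFlat pairs).count v := List.count_pos_iff.mpr hv
    have := h v hv
    have h2 : 0 < array.count v := by omega
    exact List.count_pos_iff.mp h2
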